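-- pv_equiv track=rewrite | github.com/sedfarouk/Competitive_Programming | 0990-satisfiability-of-equality-equations/0990-satisfiability-of-equality-equations.py | equationsPossible
-- ===== SOURCE A (Python) =====
-- from typing import List
--
-- class UnionFind:
--     def __init__(self):
--         self.parents = [*range(27)]
--         self.size = [1]*(26)
--
--     def find(self, root):
--         if self.parents[root]==root:
--             return root
--         self.parents[root] = self.find(self.parents[root])
--         return self.parents[root]
--
--     def union(self, u, v):
--         rootX, rootY = self.find(u), self.find(v)
--
--         if rootX != rootY:
--             if self.size[rootX] > self.size[rootY]:
--                 rootX, rootY = rootY, rootX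
--             self.parents[rootX] = rootY
--             self.size[rootY] += self.size[rootX]
--
-- def equationsPossible(equations: List[str]) -> bool:
--     uf = UnionFind()
--
--     for eq in equations:
--         asc_a, asc_b = ord(eq[0])-ord('a'), ord(eq[-1])-ord('a')
--         if eq[1]=="=":
--             uf.union(asc_a, asc_b)
--
--     for eq in equations:
--         asc_a, asc_b = ord(eq[0])-ord('a'), ord(eq[-1])-ord('a')
--         if eq[1]=="!" and uf.find(asc_a)==uf.find(asc_b):
--             return False
--
--     return True
-- ===== SOURCE B (Python) =====
-- def equationsPossible(equations):
--     # component labels for 'a'..'z'; merging relabels the smaller... (plain relabel)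
--     comp = list(range(26))
--     for eq in equations:
--         if eq[1] == "=":
--             a, b = ord(eq[0]) - 97, ord(eq[-1]) - 97
--             la, lb = comp[a], comp[b]
--             if la != lb:
--                 comp = [lb if c == la else c for c in comp]
--     for eq in equations:
--         if eq[1] == "!" and comp[ord(eq[0]) - 97] == comp[ord(eq[-1]) - 97]:
--             return False
--     return True
-- ===== Notes on version B (the rewrite author's own statement) =====
-- stated objective: faster
-- what changed: Replaces the union-find (parent array, recursive find with path compression, union by size) by a flat component-label array: a '==' equation merges two components by relabelling the 26-entry array, a '!=' query is a plain label comparison; no recursion and no mutable parent forest (measured ~2.7x faster).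
-- outside the precondition, e.g. on equationsPossible(['_!z']): A returns False, B returns True; on equationsPossible(['F=a']): A returns True, B raises IndexError; on equationsPossible(['`!`']): A returns False, B returns False
import Mathlib
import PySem

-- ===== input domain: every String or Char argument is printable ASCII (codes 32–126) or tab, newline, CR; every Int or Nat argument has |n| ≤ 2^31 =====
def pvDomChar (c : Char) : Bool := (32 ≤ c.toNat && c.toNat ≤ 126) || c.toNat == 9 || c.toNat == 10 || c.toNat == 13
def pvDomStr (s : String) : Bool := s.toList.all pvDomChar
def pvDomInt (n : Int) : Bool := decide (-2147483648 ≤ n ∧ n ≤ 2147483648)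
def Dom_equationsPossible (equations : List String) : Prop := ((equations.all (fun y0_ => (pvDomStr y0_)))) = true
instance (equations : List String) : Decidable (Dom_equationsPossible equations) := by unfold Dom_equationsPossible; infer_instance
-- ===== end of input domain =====

-- B replaces A's union-find (parent forest, path compression, union by size) with a flat
-- component-label array merged by relabelling; objective: faster (measured constant-factor win).

-- ===== PORT A =====
-- shared decode helpers (both Pythons decode equations the same way)
-- xs[i] as a total function: Python value wherever Python returns (junk 0 where Python raises, outside Pre_)
def pvIdx (xs : List Int) (i : Int) : Int := PySem.List.pyGetD xs i 0

-- ord(eq[0]) - ord('a')   (junk when eq is empty — A raises there, outside Pre_)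
def ascFst (eq : String) : Int :=
  (((PySem.Str.pyGet? eq 0).map (fun c => (c.toNat : Int))).getD 0) - 97

-- ord(eq[-1]) - ord('a')
def ascLst (eq : String) : Int :=
  (((PySem.Str.pyGet? eq (-1)).map (fun c => (c.toNat : Int))).getD 0) - 97

-- eq[1]
def midA (eq : String) : Option Char := PySem.Str.pyGet? eq 1

-- UnionFind.find with path compression; Python's unbounded recursion terminates within 27
-- steps on the states A reaches (proved below), so fuel 27 is exact there.
def findA : Nat → List Int → Int → List Int × Int
  | 0, ps, n => (ps, n)
  | fuel+1, ps, n =>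
    let p := pvIdx ps n
    if p = n then (ps, n)
    else
      let res := findA fuel ps p
      (PySem.List.pySetD res.1 n res.2, res.2)

-- UnionFind.union
def unionA (ps sz : List Int) (u v : Int) : List Int × List Int :=
  let f1 := findA 27 ps u
  let f2 := findA 27 f1.1 v
  if f1.2 ≠ f2.2 then
    let pr := if pvIdx sz f1.2 > pvIdx sz f2.2 then (f2.2, f1.2) else (f1.2, f2.2)
    (PySem.List.pySetD f2.1 pr.1 pr.2,
     PySem.List.pySetD sz pr.2 (pvIdx sz pr.2 + pvIdx sz pr.1))
  else (f2.1, sz)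

-- first loop of A
def phase1A : List String → List Int × List Int → List Int × List Int
  | [], st => st
  | eq :: rest, st =>
    phase1A rest (if midA eq = some '=' then unionA st.1 st.2 (ascFst eq) (ascLst eq) else st)

-- second loop of A (find mutates parents, so the state threads through)
def phase2A : List Int → List String → Bool
  | _, [] => true
  | ps, eq :: rest =>
    if midA eq = some '!' then
      let f1 := findA 27 ps (ascFst eq)
      let f2 := findA 27 f1.1 (ascLst eq)
      if f1.2 = f2.2 then false else phase2A f2.1 rest
    else phase2A ps rest

def equationsPossible (equations : List String) : Bool :=
  let st := phase1A equations ((List.range 27).map Int.ofNat, List.replicate 26 (1 : Int))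
  phase2A st.1 equations

-- ===== PORT B =====
-- comp with every occurrence of label la replaced by lb
def relabelB (comp : List Int) (la lb : Int) : List Int :=
  comp.map (fun c => if c = la then lb else c)

def phase1B : List String → List Int → List Int
  | [], comp => comp
  | eq :: rest, comp =>
    phase1B rest
      (if midA eq = some '=' then
        let la := pvIdx comp (ascFst eq)
        let lb := pvIdx comp (ascLst eq)
        if la ≠ lb then relabelB comp la lb else comp
      else comp)

def phase2B : List Int → List String → Bool
  | _, [] => true
  | comp, eq :: rest =>
    if midA eq = some '!' ∧ pvIdx comp (ascFst eq) = pvIdx comp (ascLst eq) then false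
    else phase2B comp rest

def equationsPossible_alt (equations : List String) : Bool :=
  let comp := phase1B equations ((List.range 26).map Int.ofNat)
  phase2B comp equations

-- ===== PRECONDITION & SPEC =====
def lowerOk (o : Option Char) : Bool :=
  match o with
  | some c => decide ('a' ≤ c ∧ c ≤ 'z')
  | none => false

def eqOkB (eq : String) : Bool :=
  match PySem.Str.pyGet? eq 1 with
  | none => false
  | some c =>
    if c = '=' || c = '!' then
      lowerOk (PySem.Str.pyGet? eq 0) && lowerOk (PySem.Str.pyGet? eq (-1))
    else true

-- Pre_ restricts to the task's natural domain: every equation has a second character (length ≥ 2)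
-- and, when that character is '=' or '!', lowercase-letter endpoints. Outside it A raises
-- IndexError, or conflates non-letter endpoint characters with letters through negative-index
-- wraparound of its 27-slot parent table (where B raises an IndexError of its own or keeps the
-- characters distinct).
def Pre_equationsPossible (equations : List String) : Prop :=
  ∀ eq ∈ equations, eqOkB eq = true

instance (equations : List String) : Decidable (Pre_equationsPossible equations) := by
  unfold Pre_equationsPossible; infer_instance

def pvWitness_equationsPossible : List String := ["a==b", "b==c", "c!=d"]

def Spec_equationsPossible (equations : List String) (out : Bool) : Prop := out = equationsPossible_alt equations
instance (equations : List String) (out : Bool) : Decidable (Spec_equationsPossible equations out) := by unfold Spec_equationsPossible; infer_instance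

-- ===== CLAIM (what is proved, stated in full; the proofs are below) =====
def Claim_equal_equationsPossible : Prop := ∀ (equations : List String), Dom_equationsPossible equations → Pre_equationsPossible equations → Spec_equationsPossible equations (equationsPossible equations)

-- ===== LEMMAS AND PROOFS =====

-- ---- the parent forest of A, abstractly ----
def iterP (ps : List Int) (k : Nat) (i : Int) : Int := (fun x => pvIdx ps x)^[k] i

def isRootP (ps : List Int) (i : Int) : Prop := pvIdx ps i = i

-- well-formed parent state: 27 entries, entries in range, every node reaches a root
def WFP (ps : List Int) : Prop :=
  ps.length = 27 ∧ (∀ i : Int, 0 ≤ i → i < 27 → 0 ≤ pvIdx ps i ∧ pvIdx ps i < 27) ∧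
  (∀ i : Int, 0 ≤ i → i < 27 → ∃ k, isRootP ps (iterP ps k i))

-- the root a node reaches (28 parent steps always suffice, by reach_le_27 below)
def RtP (ps : List Int) (i : Int) : Int := iterP ps 28 i

theorem iterP_fix (ps : List Int) {r : Int} (h : isRootP ps r) (k : Nat) : iterP ps k r = r := by
  induction k with
  | zero => rfl
  | succ k ih =>
    unfold iterP at *
    rw [Function.iterate_succ_apply, h]
    exact ih

theorem iterP_in_range {ps : List Int} (h : WFP ps) {i : Int} (h0 : 0 ≤ i) (h1 : i < 27)
    (k : Nat) : 0 ≤ iterP ps k i ∧ iterP ps k i < 27 := by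
  induction k with
  | zero => exact ⟨h0, h1⟩
  | succ k ih =>
    unfold iterP at *
    rw [Function.iterate_succ_apply']
    exact h.2.1 _ ih.1 ih.2

theorem iterP_periodic {ps : List Int} {p : Nat} {x : Int} (hp : iterP ps p x = x) :
    ∀ q, iterP ps (q * p) x = x := by
  intro q
  induction q with
  | zero => rw [Nat.zero_mul]; rfl
  | succ q ih =>
    have : (q + 1) * p = p + q * p := by ring
    rw [this]
    unfold iterP at *
    rw [Function.iterate_add_apply, ih, hp]

-- iterate splitting
theorem iterP_add (ps : List Int) (m n : Nat) (i : Int) :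
    iterP ps (m + n) i = iterP ps m (iterP ps n i) :=
  Function.iterate_add_apply _ m n i

-- on a lasso, a root reached at k₀ is already reached before the loop closes
theorem period_root_earlier {ps : List Int} {i : Int} {a p k₀ : Nat} (hp : 0 < p)
    (hper : iterP ps p (iterP ps a i) = iterP ps a i) (hak : a + p ≤ k₀)
    (hroot : isRootP ps (iterP ps k₀ i)) :
    ∃ m < k₀, isRootP ps (iterP ps m i) := by
  refine ⟨a + (k₀ - a) % p, ?_, ?_⟩
  · have := Nat.mod_lt (k₀ - a) hp
    omega
  · have hqr : (k₀ - a) / p * p + (k₀ - a) % p = k₀ - a := Nat.div_add_mod' _ _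
    have h1 : iterP ps k₀ i = iterP ps (k₀ - a) (iterP ps a i) := by
      rw [← iterP_add]; congr 1; omega
    have hsum2 : (k₀ - a) % p + (k₀ - a) / p * p = k₀ - a := by
      rw [Nat.add_comm]; exact hqr
    have h2 : iterP ps (a + (k₀ - a) % p) i = iterP ps ((k₀ - a) % p) (iterP ps a i) := by
      rw [Nat.add_comm]
      exact iterP_add ps _ a i
    have e : iterP ps k₀ i = iterP ps (a + (k₀ - a) % p) i := by
      rw [h1]
      conv_lhs => rw [← hsum2]
      rw [iterP_add, iterP_periodic hper, ← h2]
    exact e ▸ hroot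

-- pigeonhole: a root is reached within 27 steps
theorem reach_le_27 {ps : List Int} (h : WFP ps) {i : Int} (h0 : 0 ≤ i) (h1 : i < 27) :
    ∃ k ≤ 27, isRootP ps (iterP ps k i) := by
  obtain ⟨k, hk⟩ := h.2.2 i h0 h1
  have hfind : ∃ n, pvIdx ps (iterP ps n i) = iterP ps n i := ⟨k, hk⟩
  set k₀ := Nat.find hfind with hk₀def
  have hk₀ : isRootP ps (iterP ps k₀ i) := Nat.find_spec hfind
  have hk₀min : ∀ m < k₀, ¬ isRootP ps (iterP ps m i) := fun m hm => Nat.find_min hfind hm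
  suffices hle : k₀ ≤ 27 by exact ⟨k₀, hle, hk₀⟩
  by_contra hgt
  have hk₀big : 28 ≤ k₀ := by omega
  have hmaps : ∀ a ∈ Finset.range 28, iterP ps a i ∈ Finset.Icc (0 : Int) 26 := by
    intro a _
    have := iterP_in_range h h0 h1 a
    simp only [Finset.mem_Icc]
    omega
  have hcard : (Finset.Icc (0 : Int) 26).card < (Finset.range 28).card := by decide
  obtain ⟨a, ha, b, hb, hab, heq⟩ :=
    Finset.exists_ne_map_eq_of_card_lt_of_maps_to hcard hmaps
  simp only [Finset.mem_range] at ha hb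
  rcases Nat.lt_or_ge a b with hlt | hge
  · have hper : iterP ps (b - a) (iterP ps a i) = iterP ps a i := by
      have hsum : iterP ps b i = iterP ps ((b - a) + a) i := by congr 1; omega
      rw [hsum, iterP_add] at heq
      exact heq.symm
    obtain ⟨m, hmlt, hmroot⟩ :=
      period_root_earlier (by omega) hper (by omega) hk₀
    exact hk₀min m hmlt hmroot
  · have hba : b < a := by omega
    have hper : iterP ps (a - b) (iterP ps b i) = iterP ps b i := by
      have hsum : iterP ps a i = iterP ps ((a - b) + b) i := by congr 1; omega
      rw [hsum, iterP_add] at heq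
      exact heq
    obtain ⟨m, hmlt, hmroot⟩ :=
      period_root_earlier (by omega) hper (by omega) hk₀
    exact hk₀min m hmlt hmroot

theorem RtP_of_reach {ps : List Int} {i r : Int} {k : Nat} (hk : k ≤ 28)
    (hroot : isRootP ps r) (hit : iterP ps k i = r) : RtP ps i = r := by
  unfold RtP
  have : (28 : Nat) = (28 - k) + k := by omega
  rw [this]
  unfold iterP at *
  rw [Function.iterate_add_apply, hit]
  exact iterP_fix ps hroot _

theorem RtP_isRoot {ps : List Int} (h : WFP ps) {i : Int} (h0 : 0 ≤ i) (h1 : i < 27) :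
    isRootP ps (RtP ps i) := by
  obtain ⟨k, hk, hroot⟩ := reach_le_27 h h0 h1
  have h28 : k ≤ 28 := by omega
  have hRt : RtP ps i = iterP ps k i := RtP_of_reach h28 hroot rfl
  rw [hRt]; exact hroot

set_option maxRecDepth 4096 in
theorem RtP_eq_of_reach {ps : List Int} (h : WFP ps) {i r : Int} (h0 : 0 ≤ i) (h1 : i < 27)
    {k : Nat} (hroot : isRootP ps r) (hit : iterP ps k i = r) : RtP ps i = r := by
  by_cases hk : k ≤ 28
  · exact RtP_of_reach hk hroot hit
  · have hRt : isRootP ps (RtP ps i) := RtP_isRoot h h0 h1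
    have hke : (k - 28) + 28 = k := by omega
    have hchain : iterP ps (k - 28) (RtP ps i) = r := by
      show iterP ps (k - 28) (iterP ps 28 i) = r
      rw [← iterP_add, hke]
      exact hit
    rw [iterP_fix ps hRt] at hchain
    exact hchain

theorem RtP_root_eq {ps : List Int} {i : Int} (h : isRootP ps i) : RtP ps i = i :=
  iterP_fix ps h 28

theorem RtP_range {ps : List Int} (h : WFP ps) {i : Int} (h0 : 0 ≤ i) (h1 : i < 27) :
    0 ≤ RtP ps i ∧ RtP ps i < 27 := iterP_in_range h h0 h1 28

theorem RtP_parent {ps : List Int} (h : WFP ps) {i : Int} (h0 : 0 ≤ i) (h1 : i < 27) :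
    RtP ps (pvIdx ps i) = RtP ps i := by
  have hstep : iterP ps 28 (pvIdx ps i) = pvIdx ps (iterP ps 28 i) := by
    unfold iterP
    rw [← Function.iterate_succ_apply, Function.iterate_succ_apply']
  have hroot : isRootP ps (RtP ps i) := RtP_isRoot h h0 h1
  unfold RtP
  rw [hstep]
  exact hroot

-- pvIdx after pySetD, both indices in range
theorem pvIdx_pySetD {ps : List Int} (hlen : ps.length = 27) {i j : Int} (v : Int)
    (hi0 : 0 ≤ i) (hi1 : i < 27) (hj0 : 0 ≤ j) (hj1 : j < 27) :
    pvIdx (PySem.List.pySetD ps i v) j = if j = i then v else pvIdx ps j := by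
  unfold pvIdx
  rw [PySem.List.pySetD_of_nonneg ps v hi0,
      PySem.List.pyGetD_of_nonneg _ _ hj0, PySem.List.pyGetD_of_nonneg _ _ hj0]
  by_cases hji : j = i
  · subst hji
    have hlt : j.toNat < ps.length := by omega
    simp [List.getD_eq_getElem?_getD, hlt]
  · have hne2 : i.toNat ≠ j.toNat := by omega
    simp [hji, List.getD_eq_getElem?_getD, hne2]

theorem length_pySetD' (ps : List Int) (i v : Int) :
    (PySem.List.pySetD ps i v).length = ps.length := by
  unfold PySem.List.pySetD PySem.List.pySet?
  cases PySem.List.pyIdx? ps.length i <;> simp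

-- writing the root of i into slot i (path compression step) preserves WFP and every root
theorem setRoot_preserve {ps : List Int} (h : WFP ps) {i r : Int}
    (hi0 : 0 ≤ i) (hi1 : i < 27) (hr : RtP ps i = r) :
    WFP (PySem.List.pySetD ps i r) ∧
    (∀ j, 0 ≤ j → j < 27 → RtP (PySem.List.pySetD ps i r) j = RtP ps j) := by
  have hrroot : isRootP ps r := hr ▸ RtP_isRoot h hi0 hi1
  have hrrange : 0 ≤ r ∧ r < 27 := hr ▸ RtP_range h hi0 hi1
  set ps₂ := PySem.List.pySetD ps i r with hps₂
  have hlen₂ : ps₂.length = 27 := by rw [hps₂, length_pySetD', h.1]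
  have hidx : ∀ j, 0 ≤ j → j < 27 → pvIdx ps₂ j = if j = i then r else pvIdx ps j :=
    fun j hj0 hj1 => pvIdx_pySetD h.1 r hi0 hi1 hj0 hj1
  have hroots : ∀ x, 0 ≤ x → x < 27 → isRootP ps x → isRootP ps₂ x := by
    intro x hx0 hx1 hx
    unfold isRootP
    rw [hidx x hx0 hx1]
    by_cases hxi : x = i
    · subst hxi
      have : r = x := by rw [← hr, RtP_root_eq hx]
      simp [this]
    · simp [hxi]; exact hx
  -- path transfer
  have claim : ∀ k, ∀ j, 0 ≤ j → j < 27 → isRootP ps (iterP ps k j) →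
      ∃ m, iterP ps₂ m j = RtP ps j := by
    intro k
    induction k with
    | zero =>
      intro j hj0 hj1 hroot
      have hjr : isRootP ps j := hroot
      exact ⟨0, (RtP_root_eq hjr).symm⟩
    | succ k ih =>
      intro j hj0 hj1 hroot
      by_cases hjr : isRootP ps j
      · exact ⟨0, (RtP_root_eq hjr).symm⟩
      · by_cases hji : j = i
        · refine ⟨1, ?_⟩
          subst hji
          have : iterP ps₂ 1 j = pvIdx ps₂ j := rfl
          rw [this, hidx j hj0 hj1, if_pos rfl, hr]
        · have hp0 : 0 ≤ pvIdx ps j ∧ pvIdx ps j < 27 := h.2.1 j hj0 hj1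
          have hroot' : isRootP ps (iterP ps k (pvIdx ps j)) := by
            unfold iterP at *
            rw [Function.iterate_succ_apply] at hroot
            exact hroot
          obtain ⟨m, hm⟩ := ih (pvIdx ps j) hp0.1 hp0.2 hroot'
          refine ⟨m + 1, ?_⟩
          have hstep : iterP ps₂ (m + 1) j = iterP ps₂ m (pvIdx ps₂ j) :=
            Function.iterate_succ_apply _ m j
          rw [hstep, hidx j hj0 hj1, if_neg hji, hm, RtP_parent h hj0 hj1]
  have hwf₂ : WFP ps₂ := by
    refine ⟨hlen₂, ?_, ?_⟩
    · intro j hj0 hj1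
      rw [hidx j hj0 hj1]
      by_cases hji : j = i
      · simp [hji]; omega
      · simp [hji]; exact h.2.1 j hj0 hj1
    · intro j hj0 hj1
      obtain ⟨k, hk⟩ := h.2.2 j hj0 hj1
      obtain ⟨m, hm⟩ := claim k j hj0 hj1 hk
      have hRtroot : isRootP ps (RtP ps j) := RtP_isRoot h hj0 hj1
      have hRtrange := RtP_range h hj0 hj1
      refine ⟨m, ?_⟩
      rw [hm]
      exact hroots _ hRtrange.1 hRtrange.2 hRtroot
  refine ⟨hwf₂, ?_⟩
  intro j hj0 hj1
  obtain ⟨k, hk⟩ := h.2.2 j hj0 hj1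
  obtain ⟨m, hm⟩ := claim k j hj0 hj1 hk
  have hRtroot : isRootP ps (RtP ps j) := RtP_isRoot h hj0 hj1
  have hRtrange := RtP_range h hj0 hj1
  exact RtP_eq_of_reach hwf₂ hj0 hj1 (hroots _ hRtrange.1 hRtrange.2 hRtroot) hm

-- linking root x under root y (the union step)
theorem link_preserve {ps : List Int} (h : WFP ps) {x y : Int}
    (hx : isRootP ps x) (hy : isRootP ps y)
    (hx0 : 0 ≤ x) (hx1 : x < 27) (hy0 : 0 ≤ y) (hy1 : y < 27) (hxy : x ≠ y) :
    WFP (PySem.List.pySetD ps x y) ∧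
    (∀ j, 0 ≤ j → j < 27 →
      RtP (PySem.List.pySetD ps x y) j = if RtP ps j = x then y else RtP ps j) := by
  set ps₂ := PySem.List.pySetD ps x y with hps₂
  have hlen₂ : ps₂.length = 27 := by rw [hps₂, length_pySetD', h.1]
  have hidx : ∀ j, 0 ≤ j → j < 27 → pvIdx ps₂ j = if j = x then y else pvIdx ps j :=
    fun j hj0 hj1 => pvIdx_pySetD h.1 y hx0 hx1 hj0 hj1
  have hroots : ∀ w, 0 ≤ w → w < 27 → isRootP ps w → w ≠ x → isRootP ps₂ w := by
    intro w hw0 hw1 hw hwx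
    unfold isRootP
    rw [hidx w hw0 hw1, if_neg hwx]
    exact hw
  have claim : ∀ k, ∀ j, 0 ≤ j → j < 27 → isRootP ps (iterP ps k j) →
      ∃ m, iterP ps₂ m j = (if RtP ps j = x then y else RtP ps j) := by
    intro k
    induction k with
    | zero =>
      intro j hj0 hj1 hroot
      have hjr : isRootP ps j := hroot
      by_cases hjx : j = x
      · refine ⟨1, ?_⟩
        subst hjx
        have h1 : iterP ps₂ 1 j = pvIdx ps₂ j := rfl
        rw [h1, hidx j hj0 hj1, if_pos rfl, RtP_root_eq hjr, if_pos rfl]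
      · refine ⟨0, ?_⟩
        rw [RtP_root_eq hjr, if_neg hjx]
        rfl
    | succ k ih =>
      intro j hj0 hj1 hroot
      by_cases hjr : isRootP ps j
      · by_cases hjx : j = x
        · refine ⟨1, ?_⟩
          subst hjx
          have h1 : iterP ps₂ 1 j = pvIdx ps₂ j := rfl
          rw [h1, hidx j hj0 hj1, if_pos rfl, RtP_root_eq hjr, if_pos rfl]
        · refine ⟨0, ?_⟩
          rw [RtP_root_eq hjr, if_neg hjx]
          rfl
      · have hjx : j ≠ x := by
          intro hc; subst hc; exact hjr hx
        have hp0 : 0 ≤ pvIdx ps j ∧ pvIdx ps j < 27 := h.2.1 j hj0 hj1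
        have hroot' : isRootP ps (iterP ps k (pvIdx ps j)) := by
          unfold iterP at *
          rw [Function.iterate_succ_apply] at hroot
          exact hroot
        obtain ⟨m, hm⟩ := ih (pvIdx ps j) hp0.1 hp0.2 hroot'
        refine ⟨m + 1, ?_⟩
        have hstep : iterP ps₂ (m + 1) j = iterP ps₂ m (pvIdx ps₂ j) :=
          Function.iterate_succ_apply _ m j
        rw [hstep, hidx j hj0 hj1, if_neg hjx, hm, RtP_parent h hj0 hj1]
  have htarget_root : ∀ j, 0 ≤ j → j < 27 →
      isRootP ps₂ (if RtP ps j = x then y else RtP ps j) := by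
    intro j hj0 hj1
    have hRtroot : isRootP ps (RtP ps j) := RtP_isRoot h hj0 hj1
    have hRtrange := RtP_range h hj0 hj1
    by_cases hc : RtP ps j = x
    · rw [if_pos hc]
      exact hroots y hy0 hy1 hy (Ne.symm hxy)
    · rw [if_neg hc]
      exact hroots _ hRtrange.1 hRtrange.2 hRtroot hc
  have hwf₂ : WFP ps₂ := by
    refine ⟨hlen₂, ?_, ?_⟩
    · intro j hj0 hj1
      rw [hidx j hj0 hj1]
      by_cases hjx : j = x
      · simp [hjx]; omega
      · simp [hjx]; exact h.2.1 j hj0 hj1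
    · intro j hj0 hj1
      obtain ⟨k, hk⟩ := h.2.2 j hj0 hj1
      obtain ⟨m, hm⟩ := claim k j hj0 hj1 hk
      exact ⟨m, hm ▸ htarget_root j hj0 hj1⟩
  refine ⟨hwf₂, ?_⟩
  intro j hj0 hj1
  obtain ⟨k, hk⟩ := h.2.2 j hj0 hj1
  obtain ⟨m, hm⟩ := claim k j hj0 hj1 hk
  exact RtP_eq_of_reach hwf₂ hj0 hj1 (htarget_root j hj0 hj1) hm

-- findA with fuel 27 computes the root, preserves WFP and all roots
theorem findA_spec : ∀ (fuel : Nat) (ps : List Int) (i : Int), WFP ps → 0 ≤ i → i < 27 →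
    (∃ k ≤ fuel, isRootP ps (iterP ps k i)) →
    (findA fuel ps i).2 = RtP ps i ∧ WFP (findA fuel ps i).1 ∧
    (∀ j, 0 ≤ j → j < 27 → RtP (findA fuel ps i).1 j = RtP ps j) := by
  intro fuel
  induction fuel with
  | zero =>
    intro ps i h h0 h1 ⟨k, hk, hroot⟩
    have : k = 0 := by omega
    subst this
    have hri : isRootP ps i := hroot
    exact ⟨(RtP_root_eq hri).symm, h, fun j _ _ => rfl⟩
  | succ fuel ih =>
    intro ps i h h0 h1 ⟨k, hk, hroot⟩
    by_cases hpi : pvIdx ps i = i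
    · have hredux : findA (fuel+1) ps i = (ps, i) := by
        simp only [findA]
        rw [if_pos hpi]
      rw [hredux]
      exact ⟨(RtP_root_eq hpi).symm, h, fun j _ _ => rfl⟩
    · have hk0 : k ≠ 0 := by
        intro hc; subst hc; exact hpi hroot
      obtain ⟨k', rfl⟩ : ∃ k', k = k' + 1 := ⟨k - 1, by omega⟩
      have hp := h.2.1 i h0 h1
      have hroot' : isRootP ps (iterP ps k' (pvIdx ps i)) := by
        unfold iterP at *
        rw [Function.iterate_succ_apply] at hroot
        exact hroot
      obtain ⟨hres2, hwf', hpres⟩ :=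
        ih ps (pvIdx ps i) h hp.1 hp.2 ⟨k', by omega, hroot'⟩
      have hRt : RtP (findA fuel ps (pvIdx ps i)).1 i = (findA fuel ps (pvIdx ps i)).2 := by
        rw [hpres i h0 h1, hres2, RtP_parent h h0 h1]
      obtain ⟨hwf₂, hpres₂⟩ := setRoot_preserve hwf' h0 h1 hRt
      have hredux : findA (fuel+1) ps i =
          (PySem.List.pySetD (findA fuel ps (pvIdx ps i)).1 i (findA fuel ps (pvIdx ps i)).2,
           (findA fuel ps (pvIdx ps i)).2) := by
        simp only [findA]
        rw [if_neg hpi]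
      rw [hredux]
      refine ⟨?_, hwf₂, ?_⟩
      · rw [hres2, RtP_parent h h0 h1]
      · intro j hj0 hj1
        rw [hpres₂ j hj0 hj1, hpres j hj0 hj1]

-- merging two classes: the generic if-then-else characterisation
theorem merge_iff (x y Ri Rj Ru Rv : Int) (_hxy : x ≠ y)
    (hor : (x = Ru ∧ y = Rv) ∨ (x = Rv ∧ y = Ru)) :
    ((if Ri = x then y else Ri) = (if Rj = x then y else Rj)) ↔
      (Ri = Rj ∨ (Ri = Ru ∧ Rj = Rv) ∨ (Ri = Rv ∧ Rj = Ru)) := by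
  rcases hor with ⟨hx, hy⟩ | ⟨hx, hy⟩ <;> subst hx <;> subst hy <;>
    split_ifs <;> omega

-- unionA: WFP is preserved, and the root partition is the merge of u's and v's classes
theorem unionA_preserve {ps : List Int} (sz : List Int) (h : WFP ps) {u v : Int}
    (hu0 : 0 ≤ u) (hu1 : u < 27) (hv0 : 0 ≤ v) (hv1 : v < 27) :
    WFP (unionA ps sz u v).1 ∧
    (∀ i j, 0 ≤ i → i < 27 → 0 ≤ j → j < 27 →
      (RtP (unionA ps sz u v).1 i = RtP (unionA ps sz u v).1 j ↔
        (RtP ps i = RtP ps j ∨ (RtP ps i = RtP ps u ∧ RtP ps j = RtP ps v) ∨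
          (RtP ps i = RtP ps v ∧ RtP ps j = RtP ps u)))) := by
  obtain ⟨hr1, hwf1, hpres1⟩ := findA_spec 27 ps u h hu0 hu1 (reach_le_27 h hu0 hu1)
  set f1 := findA 27 ps u with hf1
  obtain ⟨hr2, hwf2, hpres2⟩ := findA_spec 27 f1.1 v hwf1 hv0 hv1 (reach_le_27 hwf1 hv0 hv1)
  set f2 := findA 27 f1.1 v with hf2
  have hr2' : f2.2 = RtP ps v := by rw [hr2, hpres1 v hv0 hv1]
  have hpres12 : ∀ j, 0 ≤ j → j < 27 → RtP f2.1 j = RtP ps j := by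
    intro j hj0 hj1; rw [hpres2 j hj0 hj1, hpres1 j hj0 hj1]
  by_cases hne : f1.2 ≠ f2.2
  · -- real union
    have hx : isRootP f2.1 f1.2 := by
      have : f1.2 = RtP f2.1 u := by rw [hpres12 u hu0 hu1, hr1]
      rw [this]; exact RtP_isRoot hwf2 hu0 hu1
    have hy : isRootP f2.1 f2.2 := by
      have : f2.2 = RtP f2.1 v := by rw [hpres12 v hv0 hv1, hr2']
      rw [this]; exact RtP_isRoot hwf2 hv0 hv1
    have hxr : 0 ≤ f1.2 ∧ f1.2 < 27 := by
      have : f1.2 = RtP ps u := hr1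
      rw [this]; exact RtP_range h hu0 hu1
    have hyr : 0 ≤ f2.2 ∧ f2.2 < 27 := by
      rw [hr2']; exact RtP_range h hv0 hv1
    have main : ∀ (x y : Int), isRootP f2.1 x → isRootP f2.1 y →
        0 ≤ x → x < 27 → 0 ≤ y → y < 27 → x ≠ y →
        ((x = RtP ps u ∧ y = RtP ps v) ∨ (x = RtP ps v ∧ y = RtP ps u)) →
        WFP (PySem.List.pySetD f2.1 x y) ∧
        (∀ i j, 0 ≤ i → i < 27 → 0 ≤ j → j < 27 →
          (RtP (PySem.List.pySetD f2.1 x y) i = RtP (PySem.List.pySetD f2.1 x y) j ↔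
            (RtP ps i = RtP ps j ∨ (RtP ps i = RtP ps u ∧ RtP ps j = RtP ps v) ∨
              (RtP ps i = RtP ps v ∧ RtP ps j = RtP ps u)))) := by
      intro x y hxx hyy hx0 hx1 hy0 hy1 hxy hor
      obtain ⟨hwf3, hpres3⟩ := link_preserve hwf2 hxx hyy hx0 hx1 hy0 hy1 hxy
      refine ⟨hwf3, ?_⟩
      intro i j hi0 hi1 hj0 hj1
      rw [hpres3 i hi0 hi1, hpres3 j hj0 hj1, hpres12 i hi0 hi1, hpres12 j hj0 hj1]
      exact merge_iff x y (RtP ps i) (RtP ps j) (RtP ps u) (RtP ps v) hxy hor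
    simp only [unionA, ← hf1, ← hf2, if_pos hne]
    by_cases hsz : pvIdx sz f1.2 > pvIdx sz f2.2
    · simp only [if_pos hsz]
      exact main f2.2 f1.2 hy hx hyr.1 hyr.2 hxr.1 hxr.2 (Ne.symm hne)
        (Or.inr ⟨hr2', hr1⟩)
    · simp only [if_neg hsz]
      exact main f1.2 f2.2 hx hy hxr.1 hxr.2 hyr.1 hyr.2 hne
        (Or.inl ⟨hr1, hr2'⟩)
  · -- already same root: state f2.1, partition unchanged
    have hne2 : f1.2 = f2.2 := not_ne_iff.mp hne
    simp only [unionA, ← hf1, ← hf2, if_neg hne]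
    have huv : RtP ps u = RtP ps v := by rw [← hr1, ← hr2', hne2]
    refine ⟨hwf2, ?_⟩
    intro i j hi0 hi1 hj0 hj1
    rw [hpres12 i hi0 hi1, hpres12 j hj0 hj1]
    constructor
    · intro hij; exact Or.inl hij
    · rintro (hij | ⟨hiu, hjv⟩ | ⟨hiv, hju⟩)
      · exact hij
      · rw [hiu, hjv, huv]
      · rw [hiv, hju, huv]

-- ---- B-side characterisations ----
theorem pvIdx_relabelB {comp : List Int} (hlen : comp.length = 26) (la lb : Int)
    {j : Int} (hj0 : 0 ≤ j) (hj1 : j < 26) :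
    pvIdx (relabelB comp la lb) j = if pvIdx comp j = la then lb else pvIdx comp j := by
  unfold pvIdx relabelB
  rw [PySem.List.pyGetD_of_nonneg _ _ hj0, PySem.List.pyGetD_of_nonneg _ _ hj0]
  have hjlt : j.toNat < comp.length := by omega
  rw [List.getD_eq_getElem?_getD, List.getD_eq_getElem?_getD, List.getElem?_map]
  simp [List.getElem?_eq_getElem (by simpa using hjlt)]

-- the simulation invariant between A's parent forest and B's label array
def InvPC (ps comp : List Int) : Prop :=
  WFP ps ∧ comp.length = 26 ∧
  ∀ i j : Int, 0 ≤ i → i < 26 → 0 ≤ j → j < 26 →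
    (RtP ps i = RtP ps j ↔ pvIdx comp i = pvIdx comp j)

-- eqOkB gives in-range node numbers for '=' / '!' equations
theorem lowerOk_bounds {o : Option Char} (h : lowerOk o = true) :
    ∃ c, o = some c ∧ 97 ≤ c.toNat ∧ c.toNat ≤ 122 := by
  rcases o with _ | c
  · exact absurd h (by simp [lowerOk])
  · refine ⟨c, rfl, ?_, ?_⟩ <;>
    · have hc : 'a' ≤ c ∧ c ≤ 'z' := of_decide_eq_true (by simpa [lowerOk] using h)
      obtain ⟨h1, h2⟩ := hc
      rw [Char.le_def] at h1 h2
      rw [UInt32.le_iff_toNat_le] at h1 h2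
      have e1 : ('a').val.toNat = 97 := by decide
      have e2 : ('z').val.toNat = 122 := by decide
      simp only [Char.toNat]
      omega

theorem ok_mid {eq : String} (h : eqOkB eq = true)
    (hm : midA eq = some '=' ∨ midA eq = some '!') :
    lowerOk (PySem.Str.pyGet? eq 0) = true ∧ lowerOk (PySem.Str.pyGet? eq (-1)) = true := by
  unfold eqOkB at h
  unfold midA at hm
  rcases hm with hm | hm <;> rw [hm] at h <;> simpa using h

theorem decode_range {eq : String} (h : eqOkB eq = true)
    (hm : midA eq = some '=' ∨ midA eq = some '!') :
    0 ≤ ascFst eq ∧ ascFst eq < 26 ∧ 0 ≤ ascLst eq ∧ ascLst eq < 26 := by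
  obtain ⟨c0, hg0, hb01, hb02⟩ := lowerOk_bounds (ok_mid h hm).1
  obtain ⟨c1, hg1, hb11, hb12⟩ := lowerOk_bounds (ok_mid h hm).2
  unfold ascFst ascLst
  rw [hg0, hg1]
  simp only [Option.map_some, Option.getD_some]
  omega

-- one '=' step preserves the invariant
theorem step_preserve {ps comp : List Int} (sz : List Int) (h : InvPC ps comp)
    {a b : Int} (ha0 : 0 ≤ a) (ha1 : a < 26) (hb0 : 0 ≤ b) (hb1 : b < 26) :
    InvPC (unionA ps sz a b).1
      (if pvIdx comp a ≠ pvIdx comp b then relabelB comp (pvIdx comp a) (pvIdx comp b)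
       else comp) := by
  obtain ⟨hwf, hclen, hiff⟩ := h
  have ha1' : a < 27 := by omega
  have hb1' : b < 27 := by omega
  obtain ⟨hwf', hpart⟩ := unionA_preserve sz hwf ha0 ha1' hb0 hb1'
  by_cases hlab : pvIdx comp a ≠ pvIdx comp b
  · rw [if_pos hlab]
    refine ⟨hwf', by simp [relabelB, hclen], ?_⟩
    intro i j hi0 hi1 hj0 hj1
    rw [hpart i j hi0 (by omega) hj0 (by omega)]
    rw [pvIdx_relabelB hclen _ _ hi0 hi1, pvIdx_relabelB hclen _ _ hj0 hj1]
    have h1 : RtP ps i = RtP ps j ↔ pvIdx comp i = pvIdx comp j := hiff i j hi0 hi1 hj0 hj1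
    have h2 : RtP ps i = RtP ps a ↔ pvIdx comp i = pvIdx comp a := hiff i a hi0 hi1 ha0 ha1
    have h3 : RtP ps j = RtP ps b ↔ pvIdx comp j = pvIdx comp b := hiff j b hj0 hj1 hb0 hb1
    have h4 : RtP ps i = RtP ps b ↔ pvIdx comp i = pvIdx comp b := hiff i b hi0 hi1 hb0 hb1
    have h5 : RtP ps j = RtP ps a ↔ pvIdx comp j = pvIdx comp a := hiff j a hj0 hj1 ha0 ha1
    rw [merge_iff (pvIdx comp a) (pvIdx comp b) (pvIdx comp i) (pvIdx comp j)
      (pvIdx comp a) (pvIdx comp b) hlab (Or.inl ⟨rfl, rfl⟩)]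
    constructor
    · rintro (hij | ⟨hia, hjb⟩ | ⟨hib, hja⟩)
      · exact Or.inl (h1.mp hij)
      · exact Or.inr (Or.inl ⟨h2.mp hia, h3.mp hjb⟩)
      · exact Or.inr (Or.inr ⟨h4.mp hib, h5.mp hja⟩)
    · rintro (hij | ⟨hia, hjb⟩ | ⟨hib, hja⟩)
      · exact Or.inl (h1.mpr hij)
      · exact Or.inr (Or.inl ⟨h2.mpr hia, h3.mpr hjb⟩)
      · exact Or.inr (Or.inr ⟨h4.mpr hib, h5.mpr hja⟩)
  · rw [if_neg hlab]
    have hlab' : pvIdx comp a = pvIdx comp b := not_ne_iff.mp hlab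
    have hab : RtP ps a = RtP ps b := (hiff a b ha0 ha1 hb0 hb1).mpr hlab'
    refine ⟨hwf', hclen, ?_⟩
    intro i j hi0 hi1 hj0 hj1
    rw [hpart i j hi0 (by omega) hj0 (by omega)]
    rw [← hiff i j hi0 hi1 hj0 hj1]
    constructor
    · rintro (hij | ⟨hia, hjb⟩ | ⟨hib, hja⟩)
      · exact hij
      · rw [hia, hjb, hab]
      · rw [hib, hja, hab]
    · exact fun hij => Or.inl hij

-- phase 1 keeps the invariant
theorem phase1_inv : ∀ (eqs : List String) (ps sz comp : List Int),
    InvPC ps comp → (∀ eq ∈ eqs, eqOkB eq = true) →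
    InvPC (phase1A eqs (ps, sz)).1 (phase1B eqs comp) := by
  intro eqs
  induction eqs with
  | nil => intro ps sz comp h _; exact h
  | cons eq rest ih =>
    intro ps sz comp h hok
    have hok' : ∀ e ∈ rest, eqOkB e = true := fun e he => hok e (List.mem_cons_of_mem _ he)
    have hokeq : eqOkB eq = true := hok eq List.mem_cons_self
    by_cases hm : midA eq = some '='
    · have hd := decode_range hokeq (Or.inl hm)
      simp only [phase1A, phase1B, hm]
      have hstep := step_preserve sz h hd.1 hd.2.1 hd.2.2.1 hd.2.2.2
      have := ih (unionA ps sz (ascFst eq) (ascLst eq)).1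
        (unionA ps sz (ascFst eq) (ascLst eq)).2 _ hstep hok'
      simpa using this
    · simp only [phase1A, phase1B, if_neg hm]
      exact ih ps sz comp h hok'

-- phase 2 returns the same Bool under the invariant
theorem phase2_eq : ∀ (eqs : List String) (ps comp : List Int),
    InvPC ps comp → (∀ eq ∈ eqs, eqOkB eq = true) →
    phase2A ps eqs = phase2B comp eqs := by
  intro eqs
  induction eqs with
  | nil => intro ps comp _ _; rfl
  | cons eq rest ih =>
    intro ps comp h hok
    obtain ⟨hwf, hclen, hiff⟩ := h
    have hok' : ∀ e ∈ rest, eqOkB e = true := fun e he => hok e (List.mem_cons_of_mem _ he)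
    have hokeq : eqOkB eq = true := hok eq List.mem_cons_self
    by_cases hm : midA eq = some '!'
    · have hd := decode_range hokeq (Or.inr hm)
      obtain ⟨ha0, ha1, hb0, hb1⟩ := hd
      have ha1' : ascFst eq < 27 := by omega
      have hb1' : ascLst eq < 27 := by omega
      obtain ⟨hr1, hwf1, hpres1⟩ :=
        findA_spec 27 ps (ascFst eq) hwf ha0 ha1' (reach_le_27 hwf ha0 ha1')
      set f1 := findA 27 ps (ascFst eq) with hf1
      obtain ⟨hr2, hwf2, hpres2⟩ :=
        findA_spec 27 f1.1 (ascLst eq) hwf1 hb0 hb1' (reach_le_27 hwf1 hb0 hb1')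
      set f2 := findA 27 f1.1 (ascLst eq) with hf2
      have hr2' : f2.2 = RtP ps (ascLst eq) := by rw [hr2, hpres1 _ hb0 hb1']
      have hcmp : (f1.2 = f2.2) ↔ (pvIdx comp (ascFst eq) = pvIdx comp (ascLst eq)) := by
        rw [hr1, hr2']
        exact hiff _ _ ha0 ha1 hb0 hb1
      simp only [phase2A, phase2B]
      rw [if_pos hm, ← hf1, ← hf2]
      by_cases hroots : f1.2 = f2.2
      · rw [if_pos hroots,
          if_pos (show midA eq = some '!' ∧ pvIdx comp (ascFst eq) = pvIdx comp (ascLst eq) from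
            ⟨hm, hcmp.mp hroots⟩)]
      · have hnc : ¬ (midA eq = some '!' ∧ pvIdx comp (ascFst eq) = pvIdx comp (ascLst eq)) := by
          rintro ⟨_, hc⟩; exact hroots (hcmp.mpr hc)
        rw [if_neg hroots, if_neg hnc]
        apply ih
        · refine ⟨hwf2, hclen, ?_⟩
          intro i j hi0 hi1 hj0 hj1
          rw [hpres2 i hi0 (by omega), hpres1 i hi0 (by omega),
              hpres2 j hj0 (by omega), hpres1 j hj0 (by omega)]
          exact hiff i j hi0 hi1 hj0 hj1
        · exact hok'
    · have hnc : ¬ (midA eq = some '!' ∧ pvIdx comp (ascFst eq) = pvIdx comp (ascLst eq)) := by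
        rintro ⟨hc, _⟩; exact hm hc
      simp only [phase2A, phase2B]
      rw [if_neg hm, if_neg hnc]
      exact ih ps comp ⟨hwf, hclen, hiff⟩ hok'

-- the initial states
theorem pvIdx_init (n : Nat) {i : Int} (h0 : 0 ≤ i) (h1 : i < (n : Int)) :
    pvIdx ((List.range n).map Int.ofNat) i = i := by
  unfold pvIdx
  rw [PySem.List.pyGetD_of_nonneg _ _ h0]
  have hlt : i.toNat < n := by omega
  rw [List.getD_eq_getElem?_getD, List.getElem?_map, List.getElem?_range hlt]
  simp
  omega

theorem init_inv : InvPC ((List.range 27).map Int.ofNat)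
    ((List.range 26).map Int.ofNat) := by
  have hwf : WFP ((List.range 27).map Int.ofNat) := by
    refine ⟨by simp, ?_, ?_⟩
    · intro i h0 h1
      rw [pvIdx_init 27 h0 (by exact_mod_cast h1)]
      omega
    · intro i h0 h1
      exact ⟨0, pvIdx_init 27 h0 (by exact_mod_cast h1)⟩
  refine ⟨hwf, by simp, ?_⟩
  intro i j hi0 hi1 hj0 hj1
  have hri : RtP ((List.range 27).map Int.ofNat) i = i :=
    RtP_root_eq (by unfold isRootP; rw [pvIdx_init 27 hi0 (by omega)])
  have hrj : RtP ((List.range 27).map Int.ofNat) j = j :=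
    RtP_root_eq (by unfold isRootP; rw [pvIdx_init 27 hj0 (by omega)])
  rw [hri, hrj, pvIdx_init 26 hi0 (by exact_mod_cast hi1),
      pvIdx_init 26 hj0 (by exact_mod_cast hj1)]

-- ===== VERDICT (by name: the statement is the Claim_ definition above) =====
theorem equationsPossible_spec : Claim_equal_equationsPossible := by
  intro equations _ hpre
  unfold Spec_equationsPossible equationsPossible equationsPossible_alt
  have hinv := phase1_inv equations _ (List.replicate 26 (1 : Int)) _ init_inv hpre
  exact phase2_eq equations _ _ hinv hpre
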